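-- pv_equiv track=rewrite | github.com/ehthiede/python-pygelib | src/pygelib/utils.py | _get_expanded_strides
-- ===== SOURCE A (Python) =====
-- def _get_expanded_strides(adims, cdims, padded_cdim_size):
--     reverse_strides = []
--     init_dim = 1
--     for d in cdims[::-1]:
--         reverse_strides.append(init_dim)
--         init_dim *= d
--     init_dim = padded_cdim_size
--     for d in adims[::-1]:
--         reverse_strides.append(init_dim)
--         init_dim *= d
--     return tuple(reverse_strides[::-1])
-- ===== SOURCE B (Python) =====
-- def _prod(xs):
--     r = 1
--     for x in xs:
--         r *= x
--     return r
--
--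
-- def _get_expanded_strides(adims, cdims, padded_cdim_size):
--     strides = [padded_cdim_size * _prod(adims[i + 1:]) for i in range(len(adims))]
--     strides += [_prod(cdims[j + 1:]) for j in range(len(cdims))]
--     return tuple(strides)
-- ===== Notes on version B (the rewrite author's own statement) =====
-- stated objective: simpler
-- what changed: Replaces A's two reversed cumulative-accumulator loops plus final list reversal with direct closed-form suffix products: each stride is computed independently as padded_cdim_size*prod(adims[i+1:]) or prod(cdims[j+1:]), emitted already in final order.
import Mathlib
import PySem

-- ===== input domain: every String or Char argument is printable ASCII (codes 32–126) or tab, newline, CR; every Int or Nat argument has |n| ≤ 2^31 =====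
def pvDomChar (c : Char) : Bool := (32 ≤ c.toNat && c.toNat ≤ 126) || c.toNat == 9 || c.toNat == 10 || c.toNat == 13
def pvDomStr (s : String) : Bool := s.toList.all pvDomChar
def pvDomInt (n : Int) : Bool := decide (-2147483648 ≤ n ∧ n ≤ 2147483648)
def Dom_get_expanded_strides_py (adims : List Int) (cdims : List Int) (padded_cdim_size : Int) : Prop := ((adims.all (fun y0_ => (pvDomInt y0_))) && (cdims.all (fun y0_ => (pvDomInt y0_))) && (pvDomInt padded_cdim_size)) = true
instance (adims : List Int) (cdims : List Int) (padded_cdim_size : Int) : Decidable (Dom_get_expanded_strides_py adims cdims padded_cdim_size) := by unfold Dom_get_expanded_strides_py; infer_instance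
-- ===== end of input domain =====

-- B replaces A's reversed cumulative-accumulator loops (plus final reversal) with independent
-- closed-form suffix products emitted directly in final order; objective: simpler.

-- ===== PORT A =====
-- one loop iteration of A: append the running stride, then multiply the accumulator by d
def pvStepA (s : List Int × Int) (d : Int) : List Int × Int := (s.1 ++ [s.2], s.2 * d)

def get_expanded_strides_py (adims : List Int) (cdims : List Int) (padded_cdim_size : Int) : List Int :=
  -- reverse_strides = []; init_dim = 1; for d in cdims[::-1]: append; init_dim *= d
  let s1 := cdims.reverse.foldl pvStepA ([], 1)
  -- init_dim = padded_cdim_size; for d in adims[::-1]: append; init_dim *= d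
  let s2 := adims.reverse.foldl pvStepA (s1.1, padded_cdim_size)
  -- return tuple(reverse_strides[::-1])
  s2.1.reverse

-- ===== PORT B =====
-- _prod(xs): r = 1; for x in xs: r *= x
def pvProd (xs : List Int) : Int := xs.foldl (· * ·) 1

def get_expanded_strides_py_alt (adims : List Int) (cdims : List Int) (padded_cdim_size : Int) : List Int :=
  ((List.range adims.length).map (fun i => padded_cdim_size * pvProd (adims.drop (i + 1))))
    ++ ((List.range cdims.length).map (fun j => pvProd (cdims.drop (j + 1))))

-- ===== PRECONDITION & SPEC =====
def Spec_get_expanded_strides_py (adims : List Int) (cdims : List Int) (padded_cdim_size : Int) (out : List Int) : Prop := out = get_expanded_strides_py_alt adims cdims padded_cdim_size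
instance (adims : List Int) (cdims : List Int) (padded_cdim_size : Int) (out : List Int) : Decidable (Spec_get_expanded_strides_py adims cdims padded_cdim_size out) := by unfold Spec_get_expanded_strides_py; infer_instance

-- ===== CLAIM (what is proved, stated in full; the proofs are below) =====
def Claim_equal_get_expanded_strides_py : Prop := ∀ (adims : List Int) (cdims : List Int) (padded_cdim_size : Int), Dom_get_expanded_strides_py adims cdims padded_cdim_size → Spec_get_expanded_strides_py adims cdims padded_cdim_size (get_expanded_strides_py adims cdims padded_cdim_size)

-- ===== LEMMAS AND PROOFS =====

-- A's accumulator loop, characterised: it appends the prefix products of the scanned list.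
theorem foldl_pvStepA (l : List Int) (rs : List Int) (init : Int) :
    l.foldl pvStepA (rs, init)
      = (rs ++ (List.range l.length).map (fun i => init * (l.take i).prod), init * l.prod) := by
  induction l generalizing rs init with
  | nil => simp
  | cons x l ih =>
      have hm : List.map ((fun i => init * ((x :: l).take i).prod) ∘ Nat.succ) (List.range l.length)
          = List.map (fun i => init * x * (l.take i).prod) (List.range l.length) := by
        have hf : ((fun i => init * ((x :: l).take i).prod) ∘ Nat.succ)
            = (fun i => init * x * (l.take i).prod) := by
          funext i
          simp [List.take_succ_cons, mul_assoc]
        rw [hf]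
      simp only [List.foldl_cons, pvStepA, ih, List.length_cons, List.range_succ_eq_map,
        List.map_cons, List.map_map, hm]
      simp [List.append_assoc, mul_assoc]

-- reversing the prefix products of the reversed list gives the suffix products
theorem rev_map_take (l : List Int) (init : Int) :
    ((List.range l.length).map (fun i => init * (l.reverse.take i).prod)).reverse
      = (List.range l.length).map (fun i => init * (l.drop (i + 1)).prod) := by
  apply List.ext_getElem
  · simp
  · intro i h1 h2
    simp only [List.length_reverse, List.length_map, List.length_range] at h1 h2
    rw [List.getElem_reverse]
    simp only [List.getElem_map, List.getElem_range, List.length_map, List.length_range,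
      List.take_reverse, List.prod_reverse]
    congr 2
    congr 1
    omega

theorem get_expanded_strides_py_eq (adims cdims : List Int) (p : Int) :
    get_expanded_strides_py adims cdims p = get_expanded_strides_py_alt adims cdims p := by
  have hp : ∀ xs : List Int, pvProd xs = xs.prod := fun xs => (List.prod_eq_foldl (l := xs)).symm
  unfold get_expanded_strides_py get_expanded_strides_py_alt
  simp only [foldl_pvStepA, List.nil_append, List.reverse_append, List.length_reverse, hp]
  congr 1
  · exact rev_map_take adims p
  · have h := rev_map_take cdims 1
    simp only [one_mul] at h ⊢
    exact h

-- ===== VERDICT (by name: the statement is the Claim_ definition above) =====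
theorem get_expanded_strides_py_spec : Claim_equal_get_expanded_strides_py := by
  intro adims cdims p _
  unfold Spec_get_expanded_strides_py
  exact get_expanded_strides_py_eq adims cdims p
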